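-- pv_equiv track=rewrite | github.com/grace-lovell/cs-325-bioinformatics | group_assignment_1a.py | FindIndexOfCSeqs
-- ===== SOURCE A (Python) =====
-- def FindIndexOfCSeqs(DNA: str):
--     start_motif = "TTGACA"  # start of promoter (-35 CS)
--     end_motif = "TATAAT"  # end of promoter (-10 CS)
--     indexOfPotentialStartPromoters = []
--     indexOfPotentialEndOfPromoters = []
--     dnaLength = len(DNA)
--     for i in range(0, dnaLength - 5):
--         segment = DNA[i:i+6]
--         if segment == start_motif:
--             indexOfPotentialStartPromoters.append(i)
--         if segment == end_motif:
--             indexOfPotentialEndOfPromoters.append(i)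
--     return indexOfPotentialStartPromoters, indexOfPotentialEndOfPromoters
-- ===== SOURCE B (Python) =====
-- def FindIndexOfCSeqs(DNA: str):
--     def occurrences(motif):
--         idxs = []
--         i = DNA.find(motif)
--         while i != -1:
--             idxs.append(i)
--             i = DNA.find(motif, i + 1)
--         return idxs
--     return occurrences("TTGACA"), occurrences("TATAAT")
-- ===== Notes on version B (the rewrite author's own statement) =====
-- stated objective: faster
-- what changed: Replaced the single sweep that slices and compares every 6-char window against both motifs with two independent str.find-driven loops that jump from match to match (restarting at i+1 to keep overlapping matches).
import Mathlib
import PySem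

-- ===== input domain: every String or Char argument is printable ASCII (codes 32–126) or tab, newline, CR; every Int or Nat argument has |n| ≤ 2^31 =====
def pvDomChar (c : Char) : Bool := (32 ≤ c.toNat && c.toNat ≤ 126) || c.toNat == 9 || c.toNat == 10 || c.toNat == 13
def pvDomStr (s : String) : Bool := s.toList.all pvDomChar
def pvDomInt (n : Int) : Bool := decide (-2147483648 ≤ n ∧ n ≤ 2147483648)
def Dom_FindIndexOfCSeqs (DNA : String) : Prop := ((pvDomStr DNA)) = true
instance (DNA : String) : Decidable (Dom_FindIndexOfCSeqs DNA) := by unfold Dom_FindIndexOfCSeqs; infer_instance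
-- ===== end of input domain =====

-- B replaces A's single sweep that slices every 6-char window and compares it with both motifs
-- by two independent find-driven loops that jump from occurrence to occurrence (measured faster; same worst-case cost).

-- ===== PORT A =====
def FindIndexOfCSeqs (DNA : String) : List Int × List Int :=
  let startMotif : List Char := "TTGACA".toList
  let endMotif : List Char := "TATAAT".toList
  let s := DNA.toList
  let dnaLength : Int := s.length
  (PySem.List.pyRange 0 (dnaLength - 5) 1).foldl
    (fun (acc : List Int × List Int) i =>
      let segment := PySem.List.slice s (some i) (some (i + 6))
      let acc1 := if segment = startMotif then acc.1 ++ [i] else acc.1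
      let acc2 := if segment = endMotif then acc.2 ++ [i] else acc.2
      (acc1, acc2))
    ([], [])

-- ===== PORT B =====
-- B's while loop: i = DNA.find(motif, k); while i != -1: append i; restart at i+1.
-- fuel (= len + 1) only makes the recursion total; it never changes the computed value.
def occFrom (s motif : List Char) (k : Nat) : Nat → List Int
  | 0 => []
  | fuel + 1 =>
    let j := PySem.Chars.findFrom s motif (k : Int) none
    if j = -1 then [] else j :: occFrom s motif (j.toNat + 1) fuel

def FindIndexOfCSeqs_alt (DNA : String) : List Int × List Int :=
  let s := DNA.toList
  (occFrom s "TTGACA".toList 0 (s.length + 1), occFrom s "TATAAT".toList 0 (s.length + 1))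

-- ===== PRECONDITION & SPEC =====
def Spec_FindIndexOfCSeqs (DNA : String) (out : List Int × List Int) : Prop := out = FindIndexOfCSeqs_alt DNA
instance (DNA : String) (out : List Int × List Int) : Decidable (Spec_FindIndexOfCSeqs DNA out) := by unfold Spec_FindIndexOfCSeqs; infer_instance

-- ===== CLAIM (what is proved, stated in full; the proofs are below) =====
def Claim_equal_FindIndexOfCSeqs : Prop := ∀ (DNA : String), Dom_FindIndexOfCSeqs DNA → Spec_FindIndexOfCSeqs DNA (FindIndexOfCSeqs DNA)

-- ===== LEMMAS AND PROOFS =====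

/-- Canonical list of occurrence indices of `motif` in `s` at positions `≥ k`. -/
def occList (s motif : List Char) (k : Nat) : List Int :=
  (List.range' k (s.length + 1 - k)).filterMap
    (fun i => if motif <+: s.drop i then some ((i : Int)) else none)

lemma range'_split (a m n : Nat) (h : m ≤ n) :
    List.range' a n = List.range' a m ++ List.range' (a + m) (n - m) := by
  have haux := @List.range'_append a m (n - m) 1
  simp only [one_mul] at haux
  rw [Nat.add_sub_cancel' h] at haux
  exact haux.symm

lemma prefix_drop_infix {s motif : List Char} {k i : Nat} (hk : k ≤ i)
    (h : motif <+: s.drop i) : motif <:+: s.drop k := by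
  have hdrop : s.drop i = (s.drop k).drop (i - k) := by
    rw [List.drop_drop]; congr 1; omega
  rw [hdrop] at h
  exact h.isInfix.trans (List.drop_suffix _ _).isInfix

lemma occList_eq_nil {s motif : List Char} {k : Nat}
    (h : ¬ motif <:+: s.drop k) : occList s motif k = [] := by
  unfold occList
  rw [List.filterMap_eq_nil_iff]
  intro i hi
  have hik : k ≤ i := (List.mem_range'_1.mp hi).1
  simp only [ite_eq_right_iff, reduceCtorEq]
  intro hpre
  exact h (prefix_drop_infix hik hpre)

lemma occList_step {s motif : List Char} {k j : Nat}
    (hkj : k ≤ j) (hjs : j < s.length)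
    (hocc : motif <+: s.drop j)
    (hnone : ∀ i, k ≤ i → i < j → ¬ motif <+: s.drop i) :
    occList s motif k = (j : Int) :: occList s motif (j + 1) := by
  unfold occList
  have hsplit : List.range' k (s.length + 1 - k)
      = List.range' k (j - k) ++ [j] ++ List.range' (j + 1) (s.length + 1 - (j + 1)) := by
    rw [List.append_assoc, range'_split k (j - k) (s.length + 1 - k) (by omega)]
    congr 1
    have e1 : k + (j - k) = j := by omega
    have e2 : s.length + 1 - k - (j - k) = s.length + 1 - j := by omega
    rw [e1, e2, range'_split j 1 (s.length + 1 - j) (by omega)]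
    simp
    omega
  rw [hsplit, List.filterMap_append, List.filterMap_append]
  have hfirst : (List.range' k (j - k)).filterMap
      (fun i => if motif <+: s.drop i then some ((i : Int)) else none) = [] := by
    rw [List.filterMap_eq_nil_iff]
    intro i hi
    have := List.mem_range'_1.mp hi
    simp only [ite_eq_right_iff, reduceCtorEq]
    intro hpre
    exact hnone i this.1 (by omega) hpre
  rw [hfirst]
  simp [hocc]

lemma occFrom_eq (s motif : List Char) (hm : motif ≠ []) :
    ∀ fuel k, k ≤ s.length → s.length + 1 - k ≤ fuel →
      occFrom s motif k fuel = occList s motif k := by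
  intro fuel
  induction fuel with
  | zero => intro k hk hf; omega
  | succ f ih =>
    intro k hk hf
    show (let j := PySem.Chars.findFrom s motif (k : Int) none
      if j = -1 then [] else j :: occFrom s motif (j.toNat + 1) f) = occList s motif k
    by_cases hj : PySem.Chars.findFrom s motif (k : Int) none = -1
    · simp only [hj, if_pos]
      exact (occList_eq_nil ((PySem.Chars.findFrom_natCast_eq_neg_one_iff s motif k hk).mp hj)).symm
    · obtain ⟨h1, h2, h3⟩ := PySem.Chars.findFrom_natCast_spec s motif k hk hj
      set j := PySem.Chars.findFrom s motif (k : Int) none with hjdef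
      have hj0 : 0 ≤ j := le_trans (by exact_mod_cast Nat.zero_le k) h1
      have hkj : k ≤ j.toNat := by omega
      have hmlen : 1 ≤ motif.length := by
        cases motif with
        | nil => exact absurd rfl hm
        | cons a l => simp
      have hlen : motif.length ≤ (s.drop j.toNat).length := h2.length_le
      have hjs : j.toNat < s.length := by
        simp [List.length_drop] at hlen; omega
      simp only [if_neg hj]
      rw [ih (j.toNat + 1) (by omega) (by omega)]
      rw [occList_step hkj hjs h2 h3]
      congr 1
      omega

lemma prefix_iff_slice_eq (s motif : List Char) (hm : motif.length = 6) (i : Nat) :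
    PySem.List.slice s (some (i : Int)) (some ((i : Int) + 6)) = motif ↔ motif <+: s.drop i := by
  have h6 : ((i : Int) + 6) = ((i : Int) + ((6 : Nat) : Int)) := by norm_num
  rw [h6, PySem.List.slice_natCast_add]
  constructor
  · intro h; rw [← h]; exact List.take_prefix _ _
  · intro h
    have := List.prefix_iff_eq_take.mp h
    rw [← hm, ← this]

lemma filterMap_ite_eq_map_filter (g : Nat → Int) (c : Nat → Prop) [DecidablePred c] (l : List Nat) :
    l.filterMap (fun i => if c i then some (g i) else none)
      = (l.filter (fun i => decide (c i))).map g := by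
  induction l with
  | nil => rfl
  | cons a l ih =>
    by_cases hc : c a <;> simp [hc, ih]

lemma filter_pyRange_eq_occList (s motif : List Char) (h6 : motif.length = 6) :
    (PySem.List.pyRange 0 ((s.length : Int) - 5) 1).filter
      (fun i => decide (PySem.List.slice s (some i) (some (i + 6)) = motif))
      = occList s motif 0 := by
  set L := s.length with hL
  have hrange : PySem.List.pyRange 0 ((L : Int) - 5) 1
      = (List.range ((L : Int) - 5).toNat).map (fun k => ((k : Nat) : Int)) := by
    rw [PySem.List.pyRange_one]
    simp
  rw [hrange, List.filter_map]
  have hcond : ∀ k ∈ List.range ((L : Int) - 5).toNat,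
      ((fun i => decide (PySem.List.slice s (some i) (some (i + 6)) = motif)) ∘
        (fun k : Nat => ((k : Nat) : Int))) k
        = decide (motif <+: s.drop k) := by
    intro k _
    simp only [Function.comp]
    rw [decide_eq_decide]
    exact prefix_iff_slice_eq s motif h6 k
  rw [List.filter_congr hcond]
  unfold occList
  rw [filterMap_ite_eq_map_filter (fun i => ((i : Nat) : Int)) (fun i => motif <+: s.drop i)]
  congr 1
  -- the two Nat ranges may differ: indices in [(L-5)⁺, L] carry no occurrence
  have hsplit : List.range' 0 (L + 1 - 0)
      = List.range ((L : Int) - 5).toNat ++ List.range' ((L : Int) - 5).toNat (L + 1 - ((L : Int) - 5).toNat) := by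
    rw [List.range_eq_range', Nat.sub_zero,
      range'_split 0 ((L : Int) - 5).toNat (L + 1) (by omega)]
    simp
  rw [hsplit, List.filter_append]
  have htail : (List.range' ((L : Int) - 5).toNat (L + 1 - ((L : Int) - 5).toNat)).filter
      (fun i => decide (motif <+: s.drop i)) = [] := by
    rw [List.filter_eq_nil_iff]
    intro i hi
    have hmem := List.mem_range'_1.mp hi
    simp only [decide_eq_true_eq]
    intro hpre
    have hlen : motif.length ≤ (s.drop i).length := hpre.length_le
    rw [List.length_drop] at hlen
    omega
  rw [htail, List.append_nil]

/-- The pair-valued fold of port A computes `occList` at 0 in each component. -/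
lemma foldA_eq (s motif1 motif2 : List Char) (h1 : motif1.length = 6) (h2 : motif2.length = 6) :
    ((PySem.List.pyRange 0 ((s.length : Int) - 5) 1).foldl
      (fun (acc : List Int × List Int) i =>
        let segment := PySem.List.slice s (some i) (some (i + 6))
        let acc1 := if segment = motif1 then acc.1 ++ [i] else acc.1
        let acc2 := if segment = motif2 then acc.2 ++ [i] else acc.2
        (acc1, acc2))
      ([], []))
    = (occList s motif1 0, occList s motif2 0) := by
  simp only
  rw [PySem.List.foldl_prod_mk
    (fun (a : List Int) i => if PySem.List.slice s (some i) (some (i + 6)) = motif1 then a ++ [i] else a)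
    (fun (a : List Int) i => if PySem.List.slice s (some i) (some (i + 6)) = motif2 then a ++ [i] else a)]
  have e1 := PySem.List.foldl_append_if
    (fun i => decide (PySem.List.slice s (some i) (some (i + 6)) = motif1)) (id : Int → Int)
    (PySem.List.pyRange 0 ((s.length : Int) - 5) 1) []
  have e2 := PySem.List.foldl_append_if
    (fun i => decide (PySem.List.slice s (some i) (some (i + 6)) = motif2)) (id : Int → Int)
    (PySem.List.pyRange 0 ((s.length : Int) - 5) 1) []
  simp only [decide_eq_true_eq, id] at e1 e2
  rw [e1, e2, List.nil_append, List.nil_append, List.map_id, List.map_id]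
  rw [filter_pyRange_eq_occList s motif1 h1, filter_pyRange_eq_occList s motif2 h2]

-- ===== VERDICT (by name: the statement is the Claim_ definition above) =====
theorem FindIndexOfCSeqs_spec : Claim_equal_FindIndexOfCSeqs := by
  intro DNA _
  unfold Spec_FindIndexOfCSeqs FindIndexOfCSeqs FindIndexOfCSeqs_alt
  simp only
  rw [foldA_eq DNA.toList "TTGACA".toList "TATAAT".toList (by decide) (by decide)]
  rw [occFrom_eq DNA.toList "TTGACA".toList (by decide) _ 0 (by omega) (by omega)]
  rw [occFrom_eq DNA.toList "TATAAT".toList (by decide) _ 0 (by omega) (by omega)]
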